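-- pv_equiv track=rewrite | github.com/jingfengou/latent-sketchpad | data/dataset.py | _split_label_text_by_image
-- ===== SOURCE A (Python) =====
-- def _split_label_text_by_image(text: str) -> list[str]:
--     parts = text.split("<image>")
--     segments = []
--     for index in range(len(parts) - 1):
--         segments.append(parts[index] + "<image>")
--     if parts:
--         segments.append(parts[-1])
--     return segments
-- ===== SOURCE B (Python) =====
-- def _split_label_text_by_image(text: str) -> list[str]:
--     sep = "<image>"
--     segments = []
--     rest = text
--     while True:
--         idx = rest.find(sep)
--         if idx == -1:
--             segments.append(rest)
--             return segments
--         segments.append(rest[:idx] + sep)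
--         rest = rest[idx + len(sep):]
-- ===== Notes on version B (the rewrite author's own statement) =====
-- stated objective: alternative
-- what changed: Replaces split-then-reassemble (build a parts list, loop over indices re-appending the delimiter, special-case the last part) with a direct cursor scan: repeatedly find the next '<image>', emit the slice up to and including it, and continue on the remainder.
import Mathlib
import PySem

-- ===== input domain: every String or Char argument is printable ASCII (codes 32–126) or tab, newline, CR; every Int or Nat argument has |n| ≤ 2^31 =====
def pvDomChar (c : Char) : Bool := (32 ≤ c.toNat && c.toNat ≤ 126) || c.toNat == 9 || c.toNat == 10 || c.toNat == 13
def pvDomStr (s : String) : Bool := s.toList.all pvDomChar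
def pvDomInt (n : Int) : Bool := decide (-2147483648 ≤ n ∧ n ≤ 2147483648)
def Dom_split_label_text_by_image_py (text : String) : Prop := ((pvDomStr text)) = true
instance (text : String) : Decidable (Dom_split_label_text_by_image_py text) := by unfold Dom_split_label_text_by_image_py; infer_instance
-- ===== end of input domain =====

-- B replaces split-then-reassemble with a direct find/slice cursor scan; alternative decomposition, same O(n) cost, return value only.

-- ===== PORT A =====
-- parts = text.split("<image>"); for index in range(len(parts)-1): segments.append(parts[index] + "<image>"); if parts: segments.append(parts[-1])
def split_label_text_by_image_py (text : String) : List String :=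
  let parts := PySem.Chars.splitOn text.toList "<image>".toList
  let segments : List String :=
    (PySem.List.pyRange 0 (PySem.List.len parts - 1)).foldl
      (fun acc index => acc ++ [String.ofList (PySem.List.pyGetD parts index [] ++ "<image>".toList)]) []
  if parts ≠ [] then segments ++ [String.ofList (PySem.List.pyGetD parts (-1) [])] else segments

-- ===== PORT B =====
-- sep = "<image>"
def imgSep : List Char := "<image>".toList

-- the while loop of B: idx = rest.find(sep); if idx == -1: append rest and stop; else append rest[:idx]+sep and continue on rest[idx+len(sep):]
def splitImgGo (rest : List Char) (segments : List (List Char)) : List (List Char) :=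
  let idx := PySem.Chars.find rest imgSep
  if idx = -1 then segments ++ [rest]
  else splitImgGo (PySem.List.slice rest (some (idx + PySem.List.len imgSep)) none)
                  (segments ++ [PySem.List.slice rest none (some idx) ++ imgSep])
termination_by rest.length
decreasing_by
  have hinf : imgSep <:+: rest := (PySem.Chars.find_ne_neg_one_iff rest imgSep).mp (by simpa using ‹¬ _›)
  have h0 : 0 ≤ PySem.Chars.find rest imgSep := (PySem.Chars.find_nonneg_iff rest imgSep).mpr hinf
  have hlen : imgSep.length ≤ rest.length := hinf.length_le
  have h7 : imgSep.length = 7 := by decide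
  rw [PySem.List.slice_from rest (by simp [PySem.List.len]; omega)]
  simp [List.length_drop, PySem.List.len]
  omega

def split_label_text_by_image_py_alt (text : String) : List String :=
  (splitImgGo text.toList []).map String.ofList

-- ===== PRECONDITION & SPEC =====
def Spec_split_label_text_by_image_py (text : String) (out : List String) : Prop := out = split_label_text_by_image_py_alt text
instance (text : String) (out : List String) : Decidable (Spec_split_label_text_by_image_py text out) := by unfold Spec_split_label_text_by_image_py; infer_instance

-- ===== CLAIM (what is proved, stated in full; the proofs are below) =====
def Claim_equal_split_label_text_by_image_py : Prop := ∀ (text : String), Dom_split_label_text_by_image_py text → Spec_split_label_text_by_image_py text (split_label_text_by_image_py text)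

-- ===== LEMMAS AND PROOFS =====

-- raw split of s on imgSep, as a find-driven recursion (proof-side reference)
def splitRec (s : List Char) : List (List Char) :=
  let idx := PySem.Chars.find s imgSep
  if idx = -1 then [s]
  else s.take idx.toNat :: splitRec (s.drop (idx.toNat + imgSep.length))
termination_by s.length
decreasing_by
  have hinf : imgSep <:+: s := (PySem.Chars.find_ne_neg_one_iff s imgSep).mp (by simpa using ‹¬ _›)
  have hlen : imgSep.length ≤ s.length := hinf.length_le
  simp [List.length_drop, imgSep]
  have : imgSep.length = 7 := by decide
  omega

def consHead (pre : List Char) : List (List Char) → List (List Char)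
  | [] => [pre]
  | p :: ps => (pre ++ p) :: ps

def glueSep : List (List Char) → List (List Char)
  | [] => []
  | [p] => [p]
  | p :: q :: rest => (p ++ imgSep) :: glueSep (q :: rest)

lemma splitRec_neg {s : List Char} (h : PySem.Chars.find s imgSep = -1) : splitRec s = [s] := by
  rw [splitRec]; simp [h]

lemma splitRec_pos {s : List Char} (h : ¬ PySem.Chars.find s imgSep = -1) :
    splitRec s = s.take (PySem.Chars.find s imgSep).toNat
      :: splitRec (s.drop ((PySem.Chars.find s imgSep).toNat + imgSep.length)) := by
  conv_lhs => rw [splitRec]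
  simp [h]

lemma splitRec_ne_nil (s : List Char) : splitRec s ≠ [] := by
  rw [splitRec]
  split <;> simp

lemma consHead_nil {S : List (List Char)} (h : S ≠ []) : consHead [] S = S := by
  cases S with
  | nil => exact absurd rfl h
  | cons p ps => simp [consHead]

lemma glueSep_cons (p : List Char) {S : List (List Char)} (h : S ≠ []) :
    glueSep (p :: S) = (p ++ imgSep) :: glueSep S := by
  cases S with
  | nil => exact absurd rfl h
  | cons q qs => simp [glueSep]

-- find is characterised by "prefix here, nowhere earlier"
lemma find_eq_of (s sub : List Char) (n : ℕ) (h1 : sub <+: s.drop n)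
    (h2 : ∀ i < n, ¬ sub <+: s.drop i) : PySem.Chars.find s sub = n := by
  have hinf : sub <:+: s := h1.isInfix.trans (List.drop_suffix n s).isInfix
  have h0 : 0 ≤ PySem.Chars.find s sub := (PySem.Chars.find_nonneg_iff s sub).mpr hinf
  obtain ⟨hp, hmin⟩ := PySem.Chars.find_spec h0
  rcases lt_trichotomy (PySem.Chars.find s sub).toNat n with h | h | h
  · exact absurd hp (h2 _ h)
  · omega
  · exact absurd h1 (hmin n h)

lemma find_prefix (s sub : List Char) (h : sub <+: s) : PySem.Chars.find s sub = 0 := by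
  have := find_eq_of s sub 0 (by simpa using h) (by omega)
  simpa using this

lemma find_cons_neg_one (c : Char) (rest sub : List Char) (hnp : ¬ sub <+: (c :: rest)) :
    (PySem.Chars.find (c :: rest) sub = -1 ↔ PySem.Chars.find rest sub = -1) := by
  rw [PySem.Chars.find_eq_neg_one_iff, PySem.Chars.find_eq_neg_one_iff, List.infix_cons_iff]
  tauto

lemma find_cons_succ (c : Char) (rest sub : List Char) (hnp : ¬ sub <+: (c :: rest))
    (h0 : 0 ≤ PySem.Chars.find rest sub) :
    PySem.Chars.find (c :: rest) sub = PySem.Chars.find rest sub + 1 := by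
  obtain ⟨hp, hmin⟩ := PySem.Chars.find_spec h0
  have := find_eq_of (c :: rest) sub ((PySem.Chars.find rest sub).toNat + 1)
    (by simpa using hp)
    (by
      intro i hi
      cases i with
      | zero => simpa using hnp
      | succ j =>
        simp only [List.drop_succ_cons]
        exact hmin j (by omega))
  rw [this]
  push_cast
  omega

lemma splitRec_nil : splitRec [] = [[]] := by
  rw [splitRec]
  have : PySem.Chars.find [] imgSep = -1 := by
    rw [PySem.Chars.find_eq_neg_one_iff]
    simp [imgSep]
  simp [this]

lemma splitRec_cons (c : Char) (rest : List Char) (hnp : ¬ imgSep <+: (c :: rest)) (pre : List Char) :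
    consHead (pre ++ [c]) (splitRec rest) = consHead pre (splitRec (c :: rest)) := by
  by_cases hneg : PySem.Chars.find rest imgSep = -1
  · have hneg' : PySem.Chars.find (c :: rest) imgSep = -1 :=
      (find_cons_neg_one c rest imgSep hnp).mpr hneg
    rw [splitRec_neg hneg, splitRec_neg hneg']
    simp [consHead]
  · have h0 : 0 ≤ PySem.Chars.find rest imgSep :=
      (PySem.Chars.find_nonneg_iff rest imgSep).mpr
        ((PySem.Chars.find_ne_neg_one_iff rest imgSep).mp hneg)
    have hsucc := find_cons_succ c rest imgSep hnp h0
    have hneg' : ¬ PySem.Chars.find (c :: rest) imgSep = -1 := by omega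
    rw [splitRec_pos hneg, splitRec_pos hneg', hsucc]
    have ht : (PySem.Chars.find rest imgSep + 1).toNat = (PySem.Chars.find rest imgSep).toNat + 1 := by omega
    rw [ht]
    have hd : (PySem.Chars.find rest imgSep).toNat + 1 + imgSep.length
        = ((PySem.Chars.find rest imgSep).toNat + imgSep.length) + 1 := by omega
    rw [hd, List.drop_succ_cons]
    simp [consHead, List.take_succ_cons, List.append_assoc]

lemma go_spec (fuel : ℕ) : ∀ (l : List Char), l.length ≤ fuel → ∀ (cur : List Char) (acc : List (List Char)),
    PySem.Chars.splitOn.go imgSep fuel l cur acc = acc.reverse ++ consHead cur.reverse (splitRec l) := by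
  induction fuel with
  | zero =>
    intro l hl cur acc
    have : l = [] := by simpa using List.length_eq_zero_iff.mp (by omega)
    subst this
    simp [PySem.Chars.splitOn.go, splitRec_nil, consHead]
  | succ fuel ih =>
    intro l hl cur acc
    cases l with
    | nil => simp [PySem.Chars.splitOn.go, splitRec_nil, consHead]
    | cons c rest =>
      have h7 : imgSep.length = 7 := by decide
      by_cases hp : imgSep.isPrefixOf (c :: rest)
      · have hpre : imgSep <+: (c :: rest) := List.isPrefixOf_iff_prefix.mp hp
        have hlen : imgSep.length ≤ (c :: rest).length := hpre.length_le
        have hfind : PySem.Chars.find (c :: rest) imgSep = 0 := find_prefix _ _ hpre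
        rw [PySem.Chars.splitOn.go, if_pos hp]
        rw [ih _ (by simp at hl ⊢; omega)]
        conv_rhs => rw [splitRec_pos (s := c :: rest) (by rw [hfind]; omega)]
        rw [hfind]
        simp only [List.reverse_nil, Int.toNat_zero, List.take_zero, Nat.zero_add]
        rw [consHead_nil (splitRec_ne_nil _)]
        simp [consHead]
      · have hnp : ¬ imgSep <+: (c :: rest) := fun h => hp (List.isPrefixOf_iff_prefix.mpr h)
        rw [PySem.Chars.splitOn.go, if_neg hp]
        rw [ih _ (by simp at hl ⊢; omega)]
        simp only [List.reverse_cons]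
        rw [splitRec_cons c rest hnp]

lemma splitOn_eq_splitRec (s : List Char) : PySem.Chars.splitOn s imgSep = splitRec s := by
  rw [PySem.Chars.splitOn, go_spec (s.length + 1) s (by omega)]
  simp [consHead_nil (splitRec_ne_nil s)]

lemma splitImgGo_spec (fuel : ℕ) : ∀ (s : List Char), s.length ≤ fuel → ∀ (acc : List (List Char)),
    splitImgGo s acc = acc ++ glueSep (splitRec s) := by
  induction fuel with
  | zero =>
    intro s hs acc
    have : s = [] := by simpa using List.length_eq_zero_iff.mp (by omega)
    subst this
    have hneg : PySem.Chars.find [] imgSep = -1 := by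
      rw [PySem.Chars.find_eq_neg_one_iff]; simp [imgSep]
    rw [splitImgGo]
    simp [hneg, splitRec_nil, glueSep]
  | succ fuel ih =>
    intro s hs acc
    by_cases hneg : PySem.Chars.find s imgSep = -1
    · rw [splitImgGo, splitRec]
      simp [hneg, glueSep]
    · have hinf : imgSep <:+: s := (PySem.Chars.find_ne_neg_one_iff s imgSep).mp hneg
      have h0 : 0 ≤ PySem.Chars.find s imgSep := (PySem.Chars.find_nonneg_iff s imgSep).mpr hinf
      have hlen : imgSep.length ≤ s.length := hinf.length_le
      have h7 : imgSep.length = 7 := by decide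
      rw [splitImgGo, splitRec]
      simp only [hneg, if_false]
      rw [PySem.List.slice_from s (by simp [PySem.List.len]; omega),
          PySem.List.slice_to s h0]
      have ht : (PySem.Chars.find s imgSep + PySem.List.len imgSep).toNat
          = (PySem.Chars.find s imgSep).toNat + imgSep.length := by
        simp [PySem.List.len]; omega
      rw [ht]
      rw [ih _ (by simp [List.length_drop]; omega)]
      rw [glueSep_cons _ (splitRec_ne_nil _)]
      simp

lemma flatMap_singleton_map {α β : Type} (f : α → β) (l : List α) :
    List.flatMap (fun a => [f a]) l = l.map f := by
  induction l <;> simp [*]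

lemma glue_eq (parts : List (List Char)) (h : parts ≠ []) :
    glueSep parts = (List.range (parts.length - 1)).map (fun k => parts.getD k [] ++ imgSep)
      ++ [(parts.getLast?).getD []] := by
  induction parts with
  | nil => simp at h
  | cons p ps ih =>
    cases ps with
    | nil => simp [glueSep]
    | cons q qs =>
      rw [glueSep_cons p (by simp)]
      rw [ih (by simp)]
      have hr : (p :: q :: qs).length - 1 = ((q :: qs).length - 1) + 1 := by simp
      rw [hr, List.range_succ_eq_map]
      simp [List.map_map, Function.comp_def]

-- ===== VERDICT (by name: the statement is the Claim_ definition above) =====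
theorem split_label_text_by_image_py_spec : Claim_equal_split_label_text_by_image_py := by
  intro text _
  unfold Spec_split_label_text_by_image_py split_label_text_by_image_py split_label_text_by_image_py_alt
  rw [show ("<image>".toList) = imgSep from rfl]
  rw [splitOn_eq_splitRec, splitImgGo_spec (text.toList.length) _ (by omega)]
  set parts := splitRec text.toList with hparts
  have hne : parts ≠ [] := splitRec_ne_nil _
  simp only [hne, ne_eq, not_false_iff, if_true]
  rw [glue_eq parts hne]
  -- last element
  have hlast : PySem.List.pyGetD parts (-1) [] = (parts.getLast?).getD [] := by
    simp [PySem.List.pyGetD, PySem.List.pyGet?_neg_one]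
  -- the foldl builds the mapped prefix
  rw [PySem.List.foldl_append_eq_flatMap]
  have hm : parts.length = (parts.length - 1) + 1 := by
    have h1 : 0 < parts.length := List.length_pos_iff.mpr hne
    omega
  have hlen : PySem.List.len parts - 1 = ((parts.length - 1 : ℕ) : ℤ) := by
    simp [PySem.List.len]; omega
  rw [hlen, PySem.List.pyRange_zero]
  simp only [Int.toNat_natCast, List.flatMap_map, List.nil_append]
  rw [flatMap_singleton_map]
  simp only [PySem.List.pyGetD_natCast]
  simp [List.map_map, Function.comp_def, hlast]
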